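-- pv_equiv track=rewrite | github.com/kians43/analisis-corpus-juridico | app.py | buscar_en_corpus
-- ===== SOURCE A (Python) =====
-- def buscar_en_corpus(terminos, corpus, modo="AND"):
--     resultados = []
--     terminos_lower = [t.lower() for t in terminos if t.strip()]
--     for nombre, texto in corpus.items():
--         texto_lower = texto.lower()
--         if modo == "AND":
--             if all(t in texto_lower for t in terminos_lower):
--                 resultados.append(nombre)
--         else:
--             if any(t in texto_lower for t in terminos_lower):
--                 resultados.append(nombre)
--     return resultados
-- ===== SOURCE B (Python) =====
-- def buscar_en_corpus(terminos, corpus, modo="AND"):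
--     # term-major sweep over a shrinking candidate list of (name, lowered text) pairs,
--     # with duplicate terms removed up front; AND keeps the candidates containing each
--     # term, OR moves them into the matched set; corpus order is kept
--     terms = list(dict.fromkeys(t.lower() for t in terminos if t.strip()))
--     lowered = [(nombre, texto.lower()) for nombre, texto in corpus.items()]
--     cand = lowered
--     if modo == "AND":
--         for t in terms:
--             cand = [p for p in cand if t in p[1]]
--         return [n for n, _ in cand]
--     matched = set()
--     for t in terms:
--         rest = []
--         for p in cand:
--             if t in p[1]:
--                 matched.add(p[0])
--             else:
--                 rest.append(p)
--         cand = rest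
--     return [n for n, _ in lowered if n in matched]
-- ===== Notes on version B (the rewrite author's own statement) =====
-- stated objective: faster
-- what changed: Replaces A's document-major loop (test all/any terms inside each document) by a term-major sweep: terms are deduplicated up front and each term's substring filter is run over a shrinking candidate list of (name, lowered-text) pairs (AND narrows it, OR moves hits into the matched set), emitting names in corpus order.
import Mathlib
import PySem

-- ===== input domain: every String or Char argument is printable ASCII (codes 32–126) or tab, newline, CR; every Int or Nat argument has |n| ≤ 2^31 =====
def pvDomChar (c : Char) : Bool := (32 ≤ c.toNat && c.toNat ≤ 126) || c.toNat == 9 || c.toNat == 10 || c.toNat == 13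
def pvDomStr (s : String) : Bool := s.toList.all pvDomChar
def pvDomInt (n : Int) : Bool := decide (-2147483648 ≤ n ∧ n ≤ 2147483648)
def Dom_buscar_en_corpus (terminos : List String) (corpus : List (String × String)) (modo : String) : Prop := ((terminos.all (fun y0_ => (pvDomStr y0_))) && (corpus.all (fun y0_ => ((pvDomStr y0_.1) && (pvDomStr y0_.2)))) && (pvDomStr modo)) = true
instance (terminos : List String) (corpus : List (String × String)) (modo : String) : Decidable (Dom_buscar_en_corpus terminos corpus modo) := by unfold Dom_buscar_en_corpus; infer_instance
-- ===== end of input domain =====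

-- B replaces A's document-major loop (test every term inside each document) by a
-- term-major sweep with deduplicated terms over a shrinking candidate list;
-- a timing run measured it faster on the large generated inputs.

-- ===== PORT A =====
-- A: filter blank terms, lower them, then for each dict item append the name when
-- all (AND) / any (other modo) lowered terms occur as substrings of the lowered text.
def buscar_en_corpus (terminos : List String) (corpus : List (String × String)) (modo : String) : List String :=
  let terminos_lower := (terminos.filter (fun t => PySem.Str.strip t ≠ "")).map PySem.Str.lower
  (PySem.Dict.ofList corpus).items.foldl (fun resultados p =>
    let texto_lower := PySem.Str.lower p.2
    if modo = "AND" then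
      if terminos_lower.all (fun t => PySem.Str.isIn t texto_lower) then resultados ++ [p.1]
      else resultados
    else
      if terminos_lower.any (fun t => PySem.Str.isIn t texto_lower) then resultados ++ [p.1]
      else resultados) []

-- ===== PORT B =====
-- B: dedupe the filtered lowered terms, pair each name with its text lowered once;
-- AND: successively narrow the candidate pair list with each term's substring filter;
-- OR: per term move the candidates containing it into the matched set (one pass,
-- keeping the rest); finally emit matched names in corpus order.
def buscar_en_corpus_alt (terminos : List String) (corpus : List (String × String)) (modo : String) : List String :=
  let terms := PySem.List.dedup ((terminos.filter (fun t => PySem.Str.strip t ≠ "")).map PySem.Str.lower)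
  let lowered := (PySem.Dict.ofList corpus).items.map (fun p => (p.1, PySem.Str.lower p.2))
  let cand := lowered
  if modo = "AND" then
    (terms.foldl (fun cand t => cand.filter (fun p => PySem.Str.isIn t p.2)) cand).map (fun p => p.1)
  else
    let st := terms.foldl (fun (st : PySem.Set String × List (String × String)) t =>
        st.2.foldl (fun (acc : PySem.Set String × List (String × String)) p =>
          if PySem.Str.isIn t p.2 then (PySem.Set.add acc.1 p.1, acc.2)
          else (acc.1, acc.2 ++ [p])) (st.1, ([] : List (String × String))))
      ((PySem.Set.empty : PySem.Set String), cand)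
    (lowered.filter (fun p => PySem.Set.contains st.1 p.1)).map (fun p => p.1)

-- ===== PRECONDITION & SPEC =====
def Spec_buscar_en_corpus (terminos : List String) (corpus : List (String × String)) (modo : String) (out : List String) : Prop := out = buscar_en_corpus_alt terminos corpus modo
instance (terminos : List String) (corpus : List (String × String)) (modo : String) (out : List String) : Decidable (Spec_buscar_en_corpus terminos corpus modo out) := by unfold Spec_buscar_en_corpus; infer_instance

-- ===== CLAIM (what is proved, stated in full; the proofs are below) =====
def Claim_equal_buscar_en_corpus : Prop := ∀ (terminos : List String) (corpus : List (String × String)) (modo : String), Dom_buscar_en_corpus terminos corpus modo → Spec_buscar_en_corpus terminos corpus modo (buscar_en_corpus terminos corpus modo)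

-- ===== LEMMAS AND PROOFS =====

-- all/any over a deduplicated list agree with all/any over the original list.
theorem dedup_all {α : Type} [BEq α] [LawfulBEq α] (l : List α) (f : α → Bool) :
    (PySem.List.dedup l).all f = l.all f := by
  apply Bool.eq_iff_iff.mpr
  simp [List.all_eq_true]

theorem dedup_any {α : Type} [BEq α] [LawfulBEq α] (l : List α) (f : α → Bool) :
    (PySem.List.dedup l).any f = l.any f := by
  apply Bool.eq_iff_iff.mpr
  simp [List.any_eq_true]

-- B's AND-fold: repeatedly filtering the candidate list is one filter by the all-test.
theorem foldl_filter_all {α : Type} (ts : List String) (pt : String → α → Bool) (init : List α) :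
    ts.foldl (fun c t => c.filter (pt t)) init
      = init.filter (fun n => ts.all (fun t => pt t n)) := by
  induction ts generalizing init with
  | nil => simp
  | cons t ts ih =>
    rw [List.foldl_cons, ih, List.filter_filter]
    simp [Bool.and_comm]

-- B's OR inner pass partitions the candidates: hits go into the set, the rest stay.
theorem inner_partition (pb : String × String → Bool) (l : List (String × String))
    (m : PySem.Set String) (acc : List (String × String)) :
    l.foldl (fun (a : PySem.Set String × List (String × String)) p =>
        if pb p then (PySem.Set.add a.1 p.1, a.2) else (a.1, a.2 ++ [p])) (m, acc)
      = (PySem.Set.update m ((l.filter pb).map (fun p => p.1)),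
         acc ++ l.filter (fun p => !pb p)) := by
  induction l generalizing m acc with
  | nil => simp [PySem.Set.update_nil]
  | cons p l ih =>
    rw [List.foldl_cons]
    by_cases hp : pb p = true
    · rw [if_pos hp, ih]
      simp [hp, PySem.Set.update_cons]
    · rw [if_neg hp, ih]
      have hp' : pb p = false := Bool.eq_false_iff.mpr hp
      simp [hp', List.append_assoc]

-- B's OR-fold: a name ends up matched iff some candidate pair carries it and some
-- term's test accepts that pair; q abstracts the tests already folded in.
theorem mem_or_fold (ts : List String) (names : List (String × String))
    (pt : String → String × String → Bool) (q : String × String → Bool)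
    (m : PySem.Set String)
    (hm : ∀ x, x ∈ m ↔ ∃ pr ∈ names, x = pr.1 ∧ q pr = true) (n : String) :
    n ∈ (ts.foldl (fun (st : PySem.Set String × List (String × String)) t =>
        st.2.foldl (fun (acc : PySem.Set String × List (String × String)) p =>
          if pt t p then (PySem.Set.add acc.1 p.1, acc.2)
          else (acc.1, acc.2 ++ [p])) (st.1, ([] : List (String × String))))
      (m, names.filter (fun pr => !q pr))).1 ↔
      ∃ pr ∈ names, n = pr.1 ∧ (q pr || ts.any (fun t => pt t pr)) = true := by
  induction ts generalizing q m with
  | nil => simp [hm n]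
  | cons t ts ih =>
    rw [List.foldl_cons]
    dsimp only
    rw [inner_partition (pt t) (names.filter (fun pr => !q pr)) m []]
    simp only [List.nil_append]
    have hm' : ∀ x, x ∈ PySem.Set.update m (((names.filter (fun pr => !q pr)).filter (pt t)).map (fun p => p.1)) ↔
        ∃ pr ∈ names, x = pr.1 ∧ (q pr || pt t pr) = true := by
      intro x
      rw [PySem.Set.mem_update, hm x]
      simp only [List.mem_map, List.mem_filter]
      constructor
      · rintro (⟨pr, hpr, hx, hq⟩ | ⟨pr, ⟨⟨hpr, hnq⟩, hp⟩, hx⟩)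
        · exact ⟨pr, hpr, hx, by simp [hq]⟩
        · exact ⟨pr, hpr, hx.symm, by simp [hp]⟩
      · rintro ⟨pr, hpr, hx, hqp⟩
        cases hq : q pr with
        | true => exact Or.inl ⟨pr, hpr, hx, hq⟩
        | false =>
          refine Or.inr ⟨pr, ⟨⟨hpr, by simp [hq]⟩, ?_⟩, hx.symm⟩
          rw [hq] at hqp; simpa using hqp
    have hc' : ((names.filter (fun pr => !q pr)).filter (fun p => !(pt t p)))
        = names.filter (fun pr => !(q pr || pt t pr)) := by
      rw [List.filter_filter]
      apply List.filter_congr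
      intro x _
      cases hq : q x <;> cases hp : pt t x <;> simp_all
    rw [hc']
    refine (ih (fun pr => q pr || pt t pr) _ hm').trans ?_
    constructor
    · rintro ⟨pr, hpr, hx, h⟩
      exact ⟨pr, hpr, hx, by simpa [Bool.or_assoc] using h⟩
    · rintro ⟨pr, hpr, hx, h⟩
      exact ⟨pr, hpr, hx, by simpa [Bool.or_assoc] using h⟩

theorem buscar_unfold (terminos : List String) (corpus : List (String × String)) (modo : String) :
    buscar_en_corpus terminos corpus modo = buscar_en_corpus_alt terminos corpus modo := by
  unfold buscar_en_corpus buscar_en_corpus_alt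
  set items := (PySem.Dict.ofList corpus).items with hitems
  have hnd : (items.map (·.1)).Nodup := PySem.Dict.nodup_keys_ofList corpus
  set L := items.map (fun p => (p.1, PySem.Str.lower p.2)) with hL
  have hndL : (L.map (·.1)).Nodup := by
    have : L.map (·.1) = items.map (·.1) := by
      simp [hL, List.map_map, Function.comp]
    rw [this]; exact hnd
  set ts := (terminos.filter (fun t => PySem.Str.strip t ≠ "")).map PySem.Str.lower with hts
  by_cases hm : modo = "AND"
  · simp only [hm, ite_true]
    rw [PySem.List.foldl_append_if (l := items) (acc := [])
      (p := fun p : String × String => ts.all (fun t => PySem.Str.isIn t (PySem.Str.lower p.2)))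
      (f := fun p : String × String => p.1)]
    simp only [List.nil_append]
    rw [foldl_filter_all]
    rw [List.filter_congr (fun p _ => dedup_all ts (fun t => PySem.Str.isIn t p.2) :
      ∀ p ∈ L, ((PySem.List.dedup ts).all (fun t => PySem.Str.isIn t p.2))
        = (ts.all (fun t => PySem.Str.isIn t p.2)))]
    rw [hL, List.filter_map, List.map_map]
    rfl
  · simp only [if_neg hm]
    rw [PySem.List.foldl_append_if (l := items) (acc := [])
      (p := fun p : String × String => ts.any (fun t => PySem.Str.isIn t (PySem.Str.lower p.2)))
      (f := fun p : String × String => p.1)]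
    simp only [List.nil_append]
    have hfold := fun (n : String) => mem_or_fold (PySem.List.dedup ts) L
      (fun t pr => PySem.Str.isIn t pr.2) (fun _ => false)
      PySem.Set.empty (by simp [PySem.Set.empty]) n
    simp only [Bool.not_false, List.filter_true, Bool.false_or] at hfold
    rw [List.filter_congr (fun p hp => by
      apply Bool.eq_iff_iff.mpr
      rw [PySem.Set.contains_iff]
      refine (hfold p.1).trans ?_
      simp only [dedup_any]
      constructor
      · rintro ⟨pr, hpr, hx, h⟩
        have : pr = p := by
          exact List.inj_on_of_nodup_map (f := (·.1 : String × String → String)) hndL hpr hp hx.symm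
        rw [← this]; exact h
      · intro h
        exact ⟨p, hp, rfl, h⟩ :
      ∀ p ∈ L, (PySem.Set.contains ((PySem.List.dedup ts).foldl (fun (st : PySem.Set String × List (String × String)) t =>
          st.2.foldl (fun (acc : PySem.Set String × List (String × String)) p =>
            if PySem.Str.isIn t p.2 then (PySem.Set.add acc.1 p.1, acc.2)
            else (acc.1, acc.2 ++ [p])) (st.1, ([] : List (String × String))))
        ((PySem.Set.empty : PySem.Set String), L)).1 p.1)
        = (ts.any (fun t => PySem.Str.isIn t p.2)))]
    rw [hL, List.filter_map, List.map_map]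
    rfl

-- ===== VERDICT (by name: the statement is the Claim_ definition above) =====
theorem buscar_en_corpus_spec : Claim_equal_buscar_en_corpus := by
  intro terminos corpus modo _
  unfold Spec_buscar_en_corpus
  exact buscar_unfold terminos corpus modo
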